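-- pv_equiv track=rewrite | github.com/psymoney/prepCodingTest | 백준/BOJ/python/2118.py | answer
-- ===== SOURCE A (Python) =====
-- def answer(N: list) -> int:
--     l, r = 0, len(N) - 1
--     dist = 0
--
--     while l != r:
--         dl, dr = sum(N[l:r]), sum(N[r:]) + sum(N[:l])
--         dist = max(dist, min(dl, dr))
--         if dl > dr:
--             l += 1
--         else:
--             r -= 1
--
--     return dist
-- ===== SOURCE B (Python) =====
-- def answer(N: list) -> int:
--     # One pass: keep the left segment sum dl incrementally; the right side is total - dl.
--     total = sum(N)
--     l, r = 0, len(N) - 1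
--     dl = total - N[r]          # sum(N[0:r]); raises IndexError on an empty list
--     dist = 0
--     while l != r:
--         dr = total - dl
--         dist = max(dist, min(dl, dr))
--         if dl > dr:
--             dl -= N[l]
--             l += 1
--         else:
--             r -= 1
--             dl -= N[r]
--     return dist
-- ===== Notes on version B (the rewrite author's own statement) =====
-- stated objective: faster
-- what changed: B computes the total once and maintains the left-segment sum dl incrementally (dr = total - dl), removing the O(n) slice sums A recomputes on every iteration.
import Mathlib
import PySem

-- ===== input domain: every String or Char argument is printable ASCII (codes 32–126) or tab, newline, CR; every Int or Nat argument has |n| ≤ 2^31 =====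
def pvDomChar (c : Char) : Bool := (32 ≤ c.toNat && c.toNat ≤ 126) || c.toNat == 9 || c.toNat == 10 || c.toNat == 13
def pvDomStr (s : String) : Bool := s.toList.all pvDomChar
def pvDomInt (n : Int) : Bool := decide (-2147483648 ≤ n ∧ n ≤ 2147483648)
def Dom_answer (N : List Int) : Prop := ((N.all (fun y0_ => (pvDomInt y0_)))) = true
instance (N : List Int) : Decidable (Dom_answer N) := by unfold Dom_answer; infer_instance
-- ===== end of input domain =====

-- B replaces A's per-iteration slice sums by one total and an incrementally maintained
-- left-segment sum (O(n) instead of O(n^2)); equality of return values proved on Pre_.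

-- ===== PORT A =====
-- A's while loop; fuel = (r - l).toNat decreases by exactly 1 per iteration.
def answerGoA (N : List Int) : Nat → Int → Int → Int → Int
  | 0, _, _, dist => dist
  | fuel + 1, l, r, dist =>
      let dl := (PySem.List.slice N (some l) (some r)).sum
      let dr := (PySem.List.slice N (some r) none).sum + (PySem.List.slice N none (some l)).sum
      let dist' := max dist (min dl dr)
      if dl > dr then answerGoA N fuel (l + 1) r dist'
      else answerGoA N fuel l (r - 1) dist'

def answer (N : List Int) : Int :=
  answerGoA N ((N.length : Int) - 1 - 0).toNat 0 ((N.length : Int) - 1) 0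

-- ===== PORT B =====
def answerGoB (N : List Int) (total : Int) : Nat → Int → Int → Int → Int → Int
  | 0, _, _, _, dist => dist
  | fuel + 1, l, r, dl, dist =>
      let dr := total - dl
      let dist' := max dist (min dl dr)
      if dl > dr then answerGoB N total fuel (l + 1) r (dl - PySem.List.pyGetD N l 0) dist'
      else answerGoB N total fuel l (r - 1) (dl - PySem.List.pyGetD N (r - 1) 0) dist'

def answer_alt (N : List Int) : Int :=
  let total := N.sum
  let r := (N.length : Int) - 1
  -- N[r]: Python raises IndexError on [], which Pre_ excludes; getD's default is unreachable on Pre_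
  let dl := total - PySem.List.pyGetD N r 0
  answerGoB N total r.toNat 0 r dl 0

-- ===== PRECONDITION & SPEC =====
-- Pre_ excludes only the empty list, on which A loops forever (r decreases without bound)
-- and B raises IndexError.
def Pre_answer (N : List Int) : Prop := N ≠ []
instance (N : List Int) : Decidable (Pre_answer N) := by unfold Pre_answer; infer_instance

def pvWitness_answer : List Int := [3, 1, 2]

def Spec_answer (N : List Int) (out : Int) : Prop := out = answer_alt N
instance (N : List Int) (out : Int) : Decidable (Spec_answer N out) := by unfold Spec_answer; infer_instance

-- ===== CLAIM (what is proved, stated in full; the proofs are below) =====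
def Claim_equal_answer : Prop := ∀ (N : List Int), Dom_answer N → Pre_answer N → Spec_answer N (answer N)

-- ===== LEMMAS AND PROOFS =====

-- sum of the slice N[l:r] for 0 ≤ l ≤ r ≤ len, in drop/take form
lemma slice_sum_eq (N : List Int) (a b : Nat) :
    (PySem.List.slice N (some (a : Int)) (some (b : Int))).sum = ((N.drop a).take (b - a)).sum := by
  rw [PySem.List.slice_natCast]

lemma total_split (N : List Int) (a b : Nat) (hab : a ≤ b) (_hb : b ≤ N.length) :
    N.sum = (N.take a).sum + ((N.drop a).take (b - a)).sum + (N.drop b).sum := by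
  have h1 : (N.take a).sum + (N.drop a).sum = N.sum := List.sum_take_add_sum_drop N a
  have h2 : ((N.drop a).take (b - a)).sum + ((N.drop a).drop (b - a)).sum = (N.drop a).sum :=
    List.sum_take_add_sum_drop _ _
  have h3 : (N.drop a).drop (b - a) = N.drop b := by
    rw [List.drop_drop]; congr 1; omega
  rw [h3] at h2
  omega

-- advancing the left pointer: sum N[a+1:b] = sum N[a:b] - N[a]
lemma left_step (N : List Int) (a b : Nat) (hab : a < b) (hb : b ≤ N.length) :
    ((N.drop (a + 1)).take (b - (a + 1))).sum = ((N.drop a).take (b - a)).sum - N[a]'(by omega) := by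
  have hd : N.drop a = N[a]'(by omega) :: N.drop (a + 1) := List.drop_eq_getElem_cons (by omega)
  have : b - a = (b - (a + 1)) + 1 := by omega
  rw [hd, this, List.take_succ_cons, List.sum_cons]
  ring

-- retreating the right pointer: sum N[a:b-1] = sum N[a:b] - N[b-1]
lemma right_step (N : List Int) (a b : Nat) (hab : a < b) (hb : b ≤ N.length) :
    ((N.drop a).take (b - 1 - a)).sum = ((N.drop a).take (b - a)).sum - N[b - 1]'(by omega) := by
  have hlen : b - 1 - a < (N.drop a).length := by simp [List.length_drop]; omega
  have : b - a = (b - 1 - a) + 1 := by omega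
  rw [this, List.take_add_one, List.sum_append]
  have hget : (N.drop a)[b - 1 - a]? = some (N[b - 1]'(by omega)) := by
    rw [List.getElem?_drop]
    rw [List.getElem?_eq_getElem (by omega)]
    congr 1
    congr 1
    omega
  rw [hget]
  simp

lemma go_eq (N : List Int) (fuel : Nat) :
    ∀ (a b : Nat) (dist : Int), a ≤ b → b ≤ N.length → fuel = b - a →
      answerGoA N fuel (a : Int) (b : Int) dist
        = answerGoB N N.sum fuel (a : Int) (b : Int) ((N.drop a).take (b - a)).sum dist := by
  induction fuel with
  | zero => intro a b dist _ _ _; rfl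
  | succ fuel ih =>
    intro a b dist hab hb hfuel
    have hab' : a < b := by omega
    unfold answerGoA answerGoB
    have hdl : (PySem.List.slice N (some (a : Int)) (some (b : Int))).sum
        = ((N.drop a).take (b - a)).sum := slice_sum_eq N a b
    have hdr : (PySem.List.slice N (some (b : Int)) none).sum
          + (PySem.List.slice N none (some (a : Int))).sum
        = N.sum - ((N.drop a).take (b - a)).sum := by
      rw [PySem.List.slice_from_natCast, PySem.List.slice_to_natCast]
      have := total_split N a b (by omega) hb
      omega
    simp only [hdl, hdr]
    split
    · -- dl > dr : l advances
      have hga : PySem.List.pyGetD N (a : Int) 0 = N[a]'(by omega) := by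
        rw [PySem.List.pyGetD_natCast]
        exact List.getD_eq_getElem N 0 (by omega)
      have h1 : ((a : Int) + 1) = ((a + 1 : Nat) : Int) := by push_cast; ring
      rw [h1, ih (a + 1) b _ (by omega) hb (by omega), hga,
        left_step N a b hab' hb]
    · -- else : r retreats
      have hgb : PySem.List.pyGetD N ((b : Int) - 1) 0 = N[b - 1]'(by omega) := by
        have h1 : ((b : Int) - 1) = ((b - 1 : Nat) : Int) := by omega
        rw [h1, PySem.List.pyGetD_natCast]
        exact List.getD_eq_getElem N 0 (by omega)
      have h1 : ((b : Int) - 1) = ((b - 1 : Nat) : Int) := by omega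
      rw [hgb, h1, ih a (b - 1) _ (by omega) (by omega) (by omega),
        right_step N a b hab' hb]

-- ===== VERDICT (by name: the statement is the Claim_ definition above) =====
theorem answer_spec : Claim_equal_answer := by
  intro N _ hpre
  have hlen : 1 ≤ N.length := List.length_pos_iff.mpr hpre
  unfold Spec_answer answer answer_alt
  show answerGoA N ((N.length : Int) - 1 - 0).toNat 0 ((N.length : Int) - 1) 0
      = answerGoB N N.sum ((N.length : Int) - 1).toNat 0 ((N.length : Int) - 1)
          (N.sum - PySem.List.pyGetD N ((N.length : Int) - 1) 0) 0
  have hb : ((N.length : Int) - 1) = ((N.length - 1 : Nat) : Int) := by omega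
  rw [hb, PySem.List.pyGetD_natCast,
    List.getD_eq_getElem N 0 (by omega : N.length - 1 < N.length)]
  have hdl : N.sum - N[N.length - 1]'(by omega)
      = ((N.drop 0).take (N.length - 1 - 0)).sum := by
    have h1 : (N.take (N.length - 1)).sum + (N.drop (N.length - 1)).sum = N.sum :=
      List.sum_take_add_sum_drop N (N.length - 1)
    have hd : N.drop (N.length - 1) = [N[N.length - 1]'(by omega)] := by
      rw [List.drop_eq_getElem_cons (by omega)]
      simp [show N.length - 1 + 1 = N.length by omega]
    rw [hd] at h1
    simp only [List.drop_zero, Nat.sub_zero]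
    simp at h1
    omega
  rw [hdl, show ((0 : Int)) = ((0 : Nat) : Int) from rfl,
    show (((N.length - 1 : Nat) : Int) - (0:Nat)).toNat = N.length - 1 by omega,
    show (((N.length - 1 : Nat) : Int)).toNat = N.length - 1 by omega]
  exact go_eq N (N.length - 1) 0 (N.length - 1) 0 (by omega) (by omega) (by omega)
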